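-- pv_equiv track=rewrite | github.com/marcinpanfil/advent-of-code-python | 2019/day04.py | contains_exactly_two_digits_raising
-- ===== SOURCE A (Python) =====
-- def contains_exactly_two_digits_raising(value):
--     is_rising = False
--     count_the_same = 0
--     has_two_in_row = False
--     mod = value % 10
--     while value > 0:
--         value = int(value / 10)
--         curr_mod = value % 10
--         if curr_mod == mod:
--             if not has_two_in_row:
--                 count_the_same += 1
--         else:
--             if count_the_same == 1:
--                 has_two_in_row = True
--             count_the_same = 0
--         if curr_mod <= mod:
--             is_rising = True
--         else:
--             return False
--         mod = curr_mod
--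
--     return is_rising and has_two_in_row
-- ===== SOURCE B (Python) =====
-- def _has_run_of_exactly_two(digits):
--     i, n = 0, len(digits)
--     while i < n:
--         j = i
--         while j < n and digits[j] == digits[i]:
--             j += 1
--         if j - i == 2:
--             return True
--         i = j
--     return False
--
--
-- def contains_exactly_two_digits_raising(value):
--     if value <= 0:
--         return False
--     digits = []
--     while value > 0:
--         digits.append(value % 10)
--         value //= 10
--     digits.reverse()
--     rising = all(a <= b for a, b in zip(digits, digits[1:]))
--     return rising and _has_run_of_exactly_two(digits)
-- ===== Notes on version B (the rewrite author's own statement) =====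
-- stated objective: simpler
-- what changed: A interleaves rising-check and run-counting in one LSB-to-MSB loop with a virtual leading-zero digit and early returns; B first extracts the digit list MSB-first, then runs two independent passes (an adjacent-pair monotonicity check and an explicit run-length scan) and conjoins them.
import Mathlib
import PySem

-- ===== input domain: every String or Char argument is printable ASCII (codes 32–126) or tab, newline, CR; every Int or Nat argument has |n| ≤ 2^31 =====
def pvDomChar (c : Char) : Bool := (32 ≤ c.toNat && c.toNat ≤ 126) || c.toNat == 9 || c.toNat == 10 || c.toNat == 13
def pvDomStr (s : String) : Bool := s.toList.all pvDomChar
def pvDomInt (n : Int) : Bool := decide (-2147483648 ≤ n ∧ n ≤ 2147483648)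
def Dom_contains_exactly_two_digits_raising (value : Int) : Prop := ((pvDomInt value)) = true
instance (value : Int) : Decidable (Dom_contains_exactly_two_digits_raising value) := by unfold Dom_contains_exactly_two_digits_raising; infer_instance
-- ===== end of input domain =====

-- B replaces A's single interleaved LSB-to-MSB loop by digit extraction followed by two
-- independent passes (monotonicity, run lengths); objective: simpler. No argument is mutated.

-- ===== PORT A =====
-- int(value / 10): inside the loop 0 < value, and on the stated domain (value <= 2^31 < 2^53)
-- Python's float division truncates to exactly value // 10, so the port uses
-- PySem.Int.floordiv (exact on the stated domain).
def loopA (value mod count : Int) (is_rising has_two : Bool) : Bool :=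
  if _h : 0 < value then
    let value' := PySem.Int.floordiv value 10
    let curr := PySem.Int.mod value' 10
    let count' := if curr = mod then (if !has_two then count + 1 else count) else 0
    let has_two' := if curr = mod then has_two else (if count = 1 then true else has_two)
    if curr ≤ mod then loopA value' curr count' true has_two'
    else false
  else is_rising && has_two
termination_by value.toNat
decreasing_by
  rw [PySem.Int.floordiv_eq_ediv_of_pos (by omega)]
  omega
def contains_exactly_two_digits_raising (value : Int) : Bool :=
  loopA value (PySem.Int.mod value 10) 0 false false

-- ===== PORT B =====
def digitsLSB (value : Int) : List Int :=
  if _h : 0 < value then PySem.Int.mod value 10 :: digitsLSB (PySem.Int.floordiv value 10)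
  else []
termination_by value.toNat
decreasing_by
  rw [PySem.Int.floordiv_eq_ediv_of_pos (by omega)]
  omega

-- all(a <= b for a, b in zip(digits, digits[1:]))
def risingCheck : List Int → Bool
  | a :: b :: rest => decide (a ≤ b) && risingCheck (b :: rest)
  | _ => true

-- length of the maximal run of d at the front (inner while of _has_run_of_exactly_two)
def runLen (d : Int) : List Int → Nat
  | x :: xs => if x = d then runLen d xs + 1 else 0
  | [] => 0

-- _has_run_of_exactly_two: scan maximal runs, succeed on a run of length exactly 2
def hasExactlyTwo : List Int → Bool
  | [] => false
  | d :: xs =>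
    let k := runLen d xs
    if k + 1 = 2 then true else hasExactlyTwo (xs.drop k)
termination_by l => l.length
decreasing_by simp only [List.length_drop, List.length_cons]; omega
def contains_exactly_two_digits_raising_alt (value : Int) : Bool :=
  if value ≤ 0 then false
  else
    let ds := (digitsLSB value).reverse
    risingCheck ds && hasExactlyTwo ds

-- ===== PRECONDITION & SPEC =====
def Spec_contains_exactly_two_digits_raising (value : Int) (out : Bool) : Prop := out = contains_exactly_two_digits_raising_alt value
instance (value : Int) (out : Bool) : Decidable (Spec_contains_exactly_two_digits_raising value out) := by unfold Spec_contains_exactly_two_digits_raising; infer_instance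

-- ===== CLAIM (what is proved, stated in full; the proofs are below) =====
def Claim_equal_contains_exactly_two_digits_raising : Prop := ∀ (value : Int), Dom_contains_exactly_two_digits_raising value → Spec_contains_exactly_two_digits_raising value (contains_exactly_two_digits_raising value)

-- ===== LEMMAS AND PROOFS =====

-- A's loop, abstracted over the list of digits it has still to produce (LSB-first,
-- ending with the virtual 0 the loop compares against on its last iteration)
def F : List Int → Int → Int → Bool → Bool
  | [], _, _, h => h
  | curr :: rest, mod, c, h =>
    let c' := if curr = mod then (if !h then c + 1 else c) else 0
    let h' := if curr = mod then h else (if c = 1 then true else h)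
    if curr ≤ mod then F rest curr c' h' else false

-- hasExactlyTwo with a carry c added to the length of the FINAL maximal run
def E : List Int → Int → Bool
  | [], _ => false
  | d :: xs, c =>
    let k := runLen d xs
    if k = xs.length then decide ((k : Int) + 1 + c = 2)
    else if k + 1 = 2 then true else E (xs.drop k) c
termination_by l _ => l.length
decreasing_by simp only [List.length_drop, List.length_cons]; omega

theorem runLen_le (d : Int) (xs : List Int) : runLen d xs ≤ xs.length := by
  induction xs with
  | nil => simp [runLen]
  | cons x xs ih => simp only [runLen, List.length_cons]; split <;> omega

theorem or_ite_true (p : Prop) [Decidable p] (a b : Bool) :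
    (if p then true else (a || b)) = (a || (if p then true else b)) := by
  by_cases hp : p <;> simp [hp]

theorem runLen_append (d : Int) (xs ys : List Int) :
    runLen d (xs ++ ys) =
      if runLen d xs = xs.length then xs.length + runLen d ys else runLen d xs := by
  induction xs with
  | nil => simp [runLen]
  | cons x xs ih =>
    simp only [List.cons_append, runLen, List.length_cons]
    by_cases hx : x = d
    · simp only [hx, ih]
      have := runLen_le d xs
      split_ifs <;> omega
    · simp only [if_neg hx]
      simp

theorem E_zero : ∀ (n : Nat) (ds : List Int), ds.length = n → E ds 0 = hasExactlyTwo ds := by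
  intro n
  induction n using Nat.strong_induction_on with
  | _ n ih =>
    intro ds hlen
    cases ds with
    | nil => simp [E, hasExactlyTwo]
    | cons d xs =>
      simp only [List.length_cons] at hlen
      rw [E, hasExactlyTwo]
      have hk := runLen_le d xs
      by_cases hfull : runLen d xs = xs.length
      · simp only [hfull]
        by_cases h2 : xs.length + 1 = 2
        · simp [h2]; omega
        · simp only [h2, List.drop_length, hasExactlyTwo]
          simp; omega
      · simp only [if_neg hfull]
        by_cases h2 : runLen d xs + 1 = 2
        · simp [h2]
        · simp only [if_neg h2]
          apply ih (xs.drop (runLen d xs)).length _ _ rfl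
          simp only [List.length_drop]
          omega

theorem E_snoc_ne : ∀ (n : Nat) (ys : List Int), ys.length = n →
    ∀ (x m c : Int), x ≠ m →
    E (ys ++ [x, m]) c = (decide (c = 1) || E (ys ++ [x]) 0) := by
  intro n
  induction n using Nat.strong_induction_on with
  | _ n ih =>
    intro ys hlen x m c hxm
    cases ys with
    | nil =>
      have hmx : ¬ (m = x) := fun h => hxm h.symm
      simp only [List.nil_append]
      rw [E, E]
      simp only [runLen, if_neg hmx, List.length_cons, List.length_nil]
      norm_num
      rw [E]
      simp only [runLen, List.length_nil]
      by_cases hc : c = 1 <;> simp [hc] <;> omega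
    | cons y t =>
      simp only [List.length_cons] at hlen
      have hrle := runLen_le y t
      simp only [List.cons_append]
      rw [E, E]
      have lenA : (t ++ [x, m]).length = t.length + 2 := by simp
      have lenB : (t ++ [x]).length = t.length + 1 := by simp
      by_cases hr : runLen y t = t.length
      · by_cases hxy : x = y
        · have hmy : ¬ (m = y) := fun h => hxm (hxy.trans h.symm)
          have hA : runLen y (t ++ [x, m]) = t.length + 1 := by
            rw [runLen_append]; simp [hr, runLen, hxy, hmy]
          have hB : runLen y (t ++ [x]) = t.length + 1 := by
            rw [runLen_append]; simp [hr, runLen, hxy]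
          have hd : (t ++ [x, m]).drop (t.length + 1) = [m] := by
            have : t ++ [x, m] = (t ++ [x]) ++ [m] := by simp
            rw [this, ← lenB, List.drop_left]
          simp only [hA, hB, lenA, lenB, hd, if_neg (by omega : ¬ t.length + 1 = t.length + 2),
            if_pos rfl]
          rw [E]
          simp only [runLen, List.length_nil, if_pos rfl]
          split_ifs <;> (rw [Bool.eq_iff_iff]; simp only [decide_eq_true_eq, Bool.or_eq_true,
            true_iff, iff_true]; push_cast; omega)
        · have hA : runLen y (t ++ [x, m]) = t.length := by
            rw [runLen_append]; simp [hr, runLen, hxy]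
          have hB : runLen y (t ++ [x]) = t.length := by
            rw [runLen_append]; simp [hr, runLen, hxy]
          have hd : (t ++ [x, m]).drop t.length = [x, m] := List.drop_left
          have hd2 : (t ++ [x]).drop t.length = [x] := List.drop_left
          have hbase := ih 0 (by omega) [] rfl x m c hxm
          simp only [List.nil_append] at hbase
          simp only [hA, hB, lenA, lenB, hd, hd2,
            if_neg (by omega : ¬ t.length = t.length + 2),
            if_neg (by omega : ¬ t.length = t.length + 1), hbase]
          rw [or_ite_true]
      · have hA : runLen y (t ++ [x, m]) = runLen y t := by
          rw [runLen_append]; simp [hr]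
        have hB : runLen y (t ++ [x]) = runLen y t := by
          rw [runLen_append]; simp [hr]
        have hd : (t ++ [x, m]).drop (runLen y t) = t.drop (runLen y t) ++ [x, m] :=
          List.drop_append_of_le_length hrle
        have hd2 : (t ++ [x]).drop (runLen y t) = t.drop (runLen y t) ++ [x] :=
          List.drop_append_of_le_length hrle
        have hrec := ih (t.drop (runLen y t)).length (by simp [List.length_drop]; omega)
          (t.drop (runLen y t)) rfl x m c hxm
        simp only [hA, hB, lenA, lenB, hd, hd2,
          if_neg (by omega : ¬ runLen y t = t.length + 2),
          if_neg (by omega : ¬ runLen y t = t.length + 1), hrec]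
        rw [or_ite_true]

theorem E_snoc_eq : ∀ (n : Nat) (ys : List Int), ys.length = n →
    ∀ (x c : Int), E (ys ++ [x]) (c + 1) = E (ys ++ [x, x]) c := by
  intro n
  induction n using Nat.strong_induction_on with
  | _ n ih =>
    intro ys hlen x c
    cases ys with
    | nil =>
      simp only [List.nil_append]
      rw [E, E]
      simp only [runLen, List.length_nil, List.length_cons, if_pos rfl]
      norm_num
      omega
    | cons y t =>
      simp only [List.length_cons] at hlen
      have hrle := runLen_le y t
      simp only [List.cons_append]
      rw [E, E]
      have lenA : (t ++ [x, x]).length = t.length + 2 := by simp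
      have lenB : (t ++ [x]).length = t.length + 1 := by simp
      by_cases hr : runLen y t = t.length
      · by_cases hxy : x = y
        · have hB : runLen y (t ++ [x]) = t.length + 1 := by
            rw [runLen_append]; simp [hr, runLen, hxy]
          have hA : runLen y (t ++ [x, x]) = t.length + 2 := by
            rw [runLen_append]; simp [hr, runLen, hxy]
          simp only [hA, hB, lenA, lenB, if_pos rfl]
          rw [Bool.eq_iff_iff]
          simp only [if_true, decide_eq_true_eq]
          constructor <;> (intro h; push_cast at h ⊢; omega)
        · have hB : runLen y (t ++ [x]) = t.length := by
            rw [runLen_append]; simp [hr, runLen, hxy]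
          have hA : runLen y (t ++ [x, x]) = t.length := by
            rw [runLen_append]; simp [hr, runLen, hxy]
          have hd : (t ++ [x, x]).drop t.length = [x, x] := List.drop_left
          have hd2 : (t ++ [x]).drop t.length = [x] := List.drop_left
          have hbase := ih 0 (by omega) [] rfl x c
          simp only [List.nil_append] at hbase
          simp only [hA, hB, lenA, lenB, hd, hd2,
            if_neg (by omega : ¬ t.length = t.length + 2),
            if_neg (by omega : ¬ t.length = t.length + 1), hbase]
      · have hA : runLen y (t ++ [x, x]) = runLen y t := by
          rw [runLen_append]; simp [hr]
        have hB : runLen y (t ++ [x]) = runLen y t := by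
          rw [runLen_append]; simp [hr]
        have hd : (t ++ [x, x]).drop (runLen y t) = t.drop (runLen y t) ++ [x, x] :=
          List.drop_append_of_le_length hrle
        have hd2 : (t ++ [x]).drop (runLen y t) = t.drop (runLen y t) ++ [x] :=
          List.drop_append_of_le_length hrle
        have hrec := ih (t.drop (runLen y t)).length (by simp [List.length_drop]; omega)
          (t.drop (runLen y t)) rfl x c
        simp only [hA, hB, lenA, lenB, hd, hd2,
          if_neg (by omega : ¬ runLen y t = t.length + 2),
          if_neg (by omega : ¬ runLen y t = t.length + 1), hrec]

theorem risingCheck_snoc_pair : ∀ (ys : List Int) (a b : Int),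
    risingCheck (ys ++ [a, b]) = (risingCheck (ys ++ [a]) && decide (a ≤ b)) := by
  intro ys
  induction ys with
  | nil => intro a b; simp [risingCheck, Bool.and_comm]
  | cons y t ih =>
    intro a b
    cases t with
    | nil => simp [risingCheck, Bool.and_assoc]
    | cons z t' =>
      simp only [List.cons_append, risingCheck] at *
      rw [ih, Bool.and_assoc]

theorem F_eq : ∀ (l : List Int) (mod c : Int) (h : Bool),
    0 ≤ mod → (∀ x ∈ l, 0 ≤ x) → 1 ≤ l.getLastD mod →
    F (l ++ [0]) mod c h =
      (risingCheck (l.reverse ++ [mod]) && (h || E (l.reverse ++ [mod]) c)) := by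
  intro l
  induction l with
  | nil =>
    intro mod c h h0 _ hlast
    simp only [List.getLastD_nil] at hlast
    have hne : ¬ ((0:Int) = mod) := by omega
    simp only [List.nil_append, F, if_neg hne, if_pos h0]
    simp only [List.reverse_nil, List.nil_append, risingCheck]
    rw [E]
    simp only [runLen, List.length_nil, if_pos rfl]
    by_cases hc : c = 1
    · simp [hc]
    · simp only [if_neg hc]
      simp only [if_true, Bool.true_and]
      rw [Bool.eq_iff_iff]
      simp only [Bool.or_eq_true, decide_eq_true_eq]
      constructor
      · exact fun hh => Or.inl hh
      · rintro (hh | hh)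
        · exact hh
        · exact absurd hh (by push_cast; omega)
  | cons x l' ih =>
    intro mod c h h0 hall hlast
    have hx : 0 ≤ x := hall x (by simp)
    have hall' : ∀ z ∈ l', 0 ≤ z := fun z hz => hall z (by simp [hz])
    have hlast' : 1 ≤ l'.getLastD x := by
      rw [List.getLastD_cons] at hlast; exact hlast
    have hrev : (x :: l').reverse ++ [mod] = l'.reverse ++ [x, mod] := by simp
    simp only [List.cons_append, F]
    by_cases hcmp : x ≤ mod
    · rw [if_pos hcmp, ih _ _ _ hx hall' hlast', hrev, risingCheck_snoc_pair]
      by_cases hxm : x = mod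
      · subst hxm
        simp only [if_pos rfl]
        cases h with
        | false =>
          simp only [Bool.not_false, if_pos rfl, Bool.false_or, if_true]
          rw [E_snoc_eq l'.reverse.length l'.reverse rfl]
          simp [Bool.and_comm, Bool.and_assoc]
        | true =>
          simp [hcmp]
      · simp only [if_neg hxm]
        rw [E_snoc_ne l'.reverse.length l'.reverse rfl x mod c hxm]
        by_cases hc : c = 1 <;>
          simp [hc, hcmp, Bool.or_assoc, Bool.or_comm, Bool.or_left_comm]
    · rw [if_neg hcmp, hrev, risingCheck_snoc_pair]
      simp [hcmp]

theorem loopA_eq_F : ∀ (n : Nat) (value : Int), value.toNat = n → 0 < value →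
    ∀ (mod c : Int) (r h : Bool),
    loopA value mod c r h = F (digitsLSB (PySem.Int.floordiv value 10) ++ [0]) mod c h := by
  intro n
  induction n using Nat.strong_induction_on with
  | _ n ih =>
    intro value hn hv mod c r h
    rw [loopA, dif_pos hv]
    have hfd : PySem.Int.floordiv value 10 = value / 10 :=
      PySem.Int.floordiv_eq_ediv_of_pos (by omega)
    by_cases hv' : 0 < PySem.Int.floordiv value 10
    · rw [digitsLSB, dif_pos hv']
      simp only [List.cons_append, F]
      by_cases hcmp : PySem.Int.mod (PySem.Int.floordiv value 10) 10 ≤ mod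
      · rw [if_pos hcmp, if_pos hcmp]
        exact ih (PySem.Int.floordiv value 10).toNat (by rw [hfd]; omega) _ rfl hv' _ _ _ _
      · rw [if_neg hcmp, if_neg hcmp]
    · have hz : PySem.Int.floordiv value 10 = 0 := by rw [hfd] at hv' ⊢; omega
      rw [digitsLSB, dif_neg hv', hz]
      have hm0 : PySem.Int.mod 0 10 = 0 := by decide
      simp only [hm0, List.nil_append, F]
      by_cases h0 : (0:Int) ≤ mod
      · rw [if_pos h0, if_pos h0, loopA, dif_neg (by omega : ¬ (0:Int) > 0)]
        simp
      · rw [if_neg h0, if_neg h0]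

theorem digitsLSB_nonneg : ∀ (n : Nat) (v : Int), v.toNat = n →
    ∀ x ∈ digitsLSB v, 0 ≤ x := by
  intro n
  induction n using Nat.strong_induction_on with
  | _ n ih =>
    intro v hn x hx
    rw [digitsLSB] at hx
    by_cases hv : 0 < v
    · rw [dif_pos hv] at hx
      rcases List.mem_cons.mp hx with h | h
      · subst h; exact PySem.Int.mod_nonneg _ (by omega)
      · have hfd : PySem.Int.floordiv v 10 = v / 10 :=
          PySem.Int.floordiv_eq_ediv_of_pos (by omega)
        exact ih (PySem.Int.floordiv v 10).toNat (by rw [hfd]; omega) _ rfl x h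
    · rw [dif_neg hv] at hx
      exact absurd hx (List.not_mem_nil)

theorem digitsLSB_last : ∀ (n : Nat) (v : Int), v.toNat = n → 0 < v →
    1 ≤ (digitsLSB (PySem.Int.floordiv v 10)).getLastD (PySem.Int.mod v 10) := by
  intro n
  induction n using Nat.strong_induction_on with
  | _ n ih =>
    intro v hn hv
    have hfd : PySem.Int.floordiv v 10 = v / 10 :=
      PySem.Int.floordiv_eq_ediv_of_pos (by omega)
    by_cases hv' : 0 < PySem.Int.floordiv v 10
    · rw [digitsLSB, dif_pos hv', List.getLastD_cons]
      exact ih (PySem.Int.floordiv v 10).toNat (by rw [hfd]; omega) _ rfl hv'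
    · have hz : v / 10 = 0 := by rw [hfd] at hv'; omega
      rw [digitsLSB, dif_neg hv', List.getLastD_nil]
      rw [PySem.Int.mod_eq_emod_of_pos (by omega)]
      omega

theorem main_eq (value : Int) :
    contains_exactly_two_digits_raising value = contains_exactly_two_digits_raising_alt value := by
  unfold contains_exactly_two_digits_raising contains_exactly_two_digits_raising_alt
  by_cases hv : 0 < value
  · rw [if_neg (by omega : ¬ value ≤ 0)]
    rw [loopA_eq_F value.toNat value rfl hv]
    rw [F_eq _ _ _ _ (PySem.Int.mod_nonneg value (by omega))
      (digitsLSB_nonneg (PySem.Int.floordiv value 10).toNat _ rfl)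
      (digitsLSB_last value.toNat value rfl hv)]
    have hds : (digitsLSB value).reverse =
        (digitsLSB (PySem.Int.floordiv value 10)).reverse ++ [PySem.Int.mod value 10] := by
      conv_lhs => rw [digitsLSB, dif_pos hv]
      rw [List.reverse_cons]
    rw [← hds, Bool.false_or, E_zero (digitsLSB value).reverse.length _ rfl]
  · rw [loopA, dif_neg hv, if_pos (by omega : value ≤ 0)]
    rfl

-- ===== VERDICT (by name: the statement is the Claim_ definition above) =====
theorem contains_exactly_two_digits_raising_spec : Claim_equal_contains_exactly_two_digits_raising := by
  intro value _
  unfold Spec_contains_exactly_two_digits_raising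
  exact main_eq value
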